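-- pv_equiv track=rewrite | github.com/gabkidner/CS_1030Programs | 15/pig_latin.py | ay_end
-- ===== SOURCE A (Python) =====
-- END = '.,!?'
--
-- def ay_end(word,index):
-- 	x = word[0:index]
-- 	word = word[index:]
-- 	for a in word:
-- 		if a in END:
-- 			ind = word.index(a)
-- 			inde = word[ind]
-- 			word = word[0:ind]
-- 			return f'{word}{x}ay{inde}'
-- 	return f'{word}{x}ay'
-- ===== SOURCE B (Python) =====
-- END = '.,!?'
--
-- def ay_end(word, index):
--     x = word[:index]
--     out = []
--     for c in word[index:]:
--         if c in END:
--             out.append(x + 'ay' + c)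
--             break
--         out.append(c)
--     else:
--         out.append(x + 'ay')
--     return ''.join(out)
-- ===== Notes on version B (the rewrite author's own statement) =====
-- stated objective: alternative
-- what changed: A scans for a delimiter, re-finds its position with str.index and slices the string twice to rebuild the result; B makes one streaming pass that accumulates output pieces in a list (for/else with break) and joins them, never computing an index or slicing the remainder.
import Mathlib
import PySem

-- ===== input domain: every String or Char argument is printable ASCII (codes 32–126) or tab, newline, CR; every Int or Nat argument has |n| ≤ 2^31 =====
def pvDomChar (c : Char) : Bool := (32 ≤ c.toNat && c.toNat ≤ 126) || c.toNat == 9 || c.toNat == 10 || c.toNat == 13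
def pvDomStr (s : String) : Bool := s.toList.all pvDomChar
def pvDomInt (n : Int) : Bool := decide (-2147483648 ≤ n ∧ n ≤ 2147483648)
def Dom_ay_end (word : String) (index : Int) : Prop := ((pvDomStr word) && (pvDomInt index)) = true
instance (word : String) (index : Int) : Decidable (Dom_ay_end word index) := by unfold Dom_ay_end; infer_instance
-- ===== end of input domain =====

-- B replaces A's scan + str.index re-find + double slicing by a single streaming pass that
-- accumulates output pieces and joins them (alternative decomposition, same cost).

-- the module constant END = '.,!?'
def pvEND : List Char := ['.', ',', '!', '?']

-- ===== PORT A =====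
-- the 'for a in word' loop; x and w fixed, scanning the chars of w
def ayLoopA (x w : List Char) : List Char → List Char
  | [] => w ++ x ++ ['a', 'y']
  | a :: t =>
    if a ∈ pvEND then
      -- ind = word.index(a); it always succeeds (a ∈ w), so find never returns -1 here
      let ind := PySem.Chars.find w [a]
      -- inde = word[ind]; ind is in range, so pyGet? is some (default never read)
      let inde := (PySem.List.pyGet? w ind).getD a
      PySem.List.slice w (some 0) (some ind) ++ x ++ ['a', 'y'] ++ [inde]
    else ayLoopA x w t

def ay_end (word : String) (index : Int) : String :=
  let cs := word.toList
  let x := PySem.List.slice cs (some 0) (some index)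
  let w := PySem.List.slice cs (some index) none
  String.ofList (ayLoopA x w w)

-- ===== PORT B =====
-- the 'for c in word[index:] … else' loop; out is the accumulated join of the pieces appended
def ayLoopB (x : List Char) (out : List Char) : List Char → List Char
  | [] => out ++ (x ++ ['a', 'y'])                         -- else: out.append(x+'ay'); join
  | c :: t =>
    if c ∈ pvEND then out ++ (x ++ ['a', 'y'] ++ [c])      -- out.append(x+'ay'+c); break; join
    else ayLoopB x (out ++ [c]) t                          -- out.append(c)

def ay_end_alt (word : String) (index : Int) : String :=
  let cs := word.toList
  let x := PySem.List.slice cs none (some index)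
  String.ofList (ayLoopB x [] (PySem.List.slice cs (some index) none))

-- ===== PRECONDITION & SPEC =====
def Spec_ay_end (word : String) (index : Int) (out : String) : Prop := out = ay_end_alt word index
instance (word : String) (index : Int) (out : String) : Decidable (Spec_ay_end word index out) := by unfold Spec_ay_end; infer_instance

-- ===== CLAIM (what is proved, stated in full; the proofs are below) =====
def Claim_equal_ay_end : Prop := ∀ (word : String) (index : Int), Dom_ay_end word index → Spec_ay_end word index (ay_end word index)

-- ===== LEMMAS AND PROOFS =====

-- word.index(a) finds a at position pre.length when a does not occur earlier
lemma find_go_append (a : Char) (t : List Char) :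
    ∀ (pre : List Char) (k : Nat), a ∉ pre →
      PySem.Chars.find.go [a] (pre ++ a :: t) k = ((k : Int) + pre.length) := by
  intro pre
  induction pre with
  | nil =>
    intro k _
    simp [PySem.Chars.find.go, List.isPrefixOf]
  | cons c pre ih =>
    intro k hna
    have hac : ¬ ([a].isPrefixOf (c :: (pre ++ a :: t)) = true) := by
      simp [List.isPrefixOf]
      simp at hna
      exact fun h => hna.1 h
    rw [List.cons_append]
    simp only [PySem.Chars.find.go]
    rw [if_neg hac, ih (k + 1) (by simp at hna; exact hna.2)]
    simp only [List.length_cons]; push_cast; omega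

lemma find_append (a : Char) (t pre : List Char) (h : a ∉ pre) :
    PySem.Chars.find (pre ++ a :: t) [a] = (pre.length : Int) := by
  have := find_go_append a t pre 0 h
  simpa [PySem.Chars.find] using this

-- A's loop over the tail t of w = pre ++ t, with no delimiter in pre, equals B's loop
-- with pre already accumulated in out
lemma loop_eq (x : List Char) :
    ∀ (t pre : List Char), (∀ c ∈ pre, c ∉ pvEND) →
      ayLoopA x (pre ++ t) t = ayLoopB x pre t := by
  intro t
  induction t with
  | nil =>
    intro pre _
    simp [ayLoopA, ayLoopB]
  | cons a t ih =>
    intro pre hpre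
    by_cases ha : a ∈ pvEND
    · have hanp : a ∉ pre := fun hm => hpre a hm ha
      have hfind : PySem.Chars.find (pre ++ a :: t) [a] = (pre.length : Int) :=
        find_append a t pre hanp
      have hget : PySem.List.pyGet? (pre ++ a :: t) (pre.length : Int) = some a := by
        rw [PySem.List.pyGet?_natCast]
        simp
      have hslice : PySem.List.slice (pre ++ a :: t) (some 0) (some (pre.length : Int))
          = pre := by
        rw [PySem.List.slice_zero_start, PySem.List.slice_to_natCast]
        simp
      simp only [ayLoopA, ayLoopB, if_pos ha, hfind, hget, hslice, Option.getD_some]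
      simp
    · have hpre' : ∀ c ∈ pre ++ [a], c ∉ pvEND := by
        intro c hc
        rcases List.mem_append.mp hc with h | h
        · exact hpre c h
        · simp at h; subst h; exact ha
      have := ih (pre ++ [a]) hpre'
      simp only [ayLoopA, ayLoopB, if_neg ha]
      simpa [List.append_assoc] using this

-- ===== VERDICT (by name: the statement is the Claim_ definition above) =====
theorem ay_end_spec : Claim_equal_ay_end := by
  intro word index _
  unfold Spec_ay_end ay_end ay_end_alt
  simp only [PySem.List.slice_zero_start]
  congr 1
  exact loop_eq _ _ [] (by simp)
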